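-- pv_equiv track=rewrite | github.com/Norang2810/AI-project | ai-server/models/ai_analysis_engine.py | _determine_final_risk
-- ===== SOURCE A (Python) =====
-- from typing import List, Dict, Optional
--
-- def _determine_final_risk(ml_risk: Dict, rule_risk: Dict) -> str:
--     """ML 예측과 규칙 기반 분석을 결합한 최종 위험도 결정"""
--     if not ml_risk or not rule_risk:
--         return "unknown"
--
--     # ML 예측과 규칙 기반 결과 결합
--     ml_level = ml_risk.get('final_risk', 'unknown')
--     rule_level = rule_risk.get('risk_level', 'unknown')
--
--     # 위험도 매핑
--     risk_mapping = {
--         'safe': 0,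
--         'low_risk': 1,
--         'high_risk': 2,
--         'dangerous': 3
--     }
--
--     ml_score = risk_mapping.get(ml_level, 1)
--     rule_score = risk_mapping.get(rule_level, 1)
--
--     # 더 높은 위험도 선택 (보수적 접근)
--     final_score = max(ml_score, rule_score)
--
--     # 점수를 위험도로 변환
--     for risk_level, score in risk_mapping.items():
--         if score == final_score:
--             return risk_level
--
--     return "unknown"
-- ===== SOURCE B (Python) =====
-- def _determine_final_risk(ml_risk, rule_risk):
--     if not ml_risk or not rule_risk:
--         return "unknown"
--     pair = (ml_risk.get('final_risk', 'unknown'), rule_risk.get('risk_level', 'unknown'))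
--     # decision chain, most severe first; anything unrecognized counts as low_risk
--     if 'dangerous' in pair:
--         return 'dangerous'
--     if 'high_risk' in pair:
--         return 'high_risk'
--     if pair == ('safe', 'safe'):
--         return 'safe'
--     return 'low_risk'
-- ===== Notes on version B (the rewrite author's own statement) =====
-- stated objective: simpler
-- what changed: Replaces the score mapping, numeric max and the reverse score-to-name loop with a direct early-return decision chain over the two looked-up labels: dangerous if either is dangerous, else high_risk if either is high_risk, else safe only if both are safe, else low_risk; no ranks or scores are computed at all.
import Mathlib
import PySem

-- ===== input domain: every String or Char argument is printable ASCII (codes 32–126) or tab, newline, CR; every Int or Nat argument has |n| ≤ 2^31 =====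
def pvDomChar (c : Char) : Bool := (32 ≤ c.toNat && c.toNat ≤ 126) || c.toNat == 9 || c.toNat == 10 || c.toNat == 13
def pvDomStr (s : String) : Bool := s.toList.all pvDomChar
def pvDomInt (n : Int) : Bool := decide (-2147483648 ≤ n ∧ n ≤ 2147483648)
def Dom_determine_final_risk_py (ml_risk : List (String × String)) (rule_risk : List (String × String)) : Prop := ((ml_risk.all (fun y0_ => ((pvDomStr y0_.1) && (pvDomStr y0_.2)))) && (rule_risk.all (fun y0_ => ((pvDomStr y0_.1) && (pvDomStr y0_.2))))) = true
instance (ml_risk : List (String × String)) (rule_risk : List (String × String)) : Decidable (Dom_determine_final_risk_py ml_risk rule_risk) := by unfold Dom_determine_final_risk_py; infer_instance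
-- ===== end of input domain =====

-- B replaces the numeric scoring dict, max-of-scores and the reverse score→name loop with a
-- direct early-return decision chain over the two looked-up labels (objective: simpler).

-- ===== PORT A =====
def determine_final_risk_py (ml_risk : List (String × String)) (rule_risk : List (String × String)) : String :=
  if ml_risk = [] ∨ rule_risk = [] then "unknown"
  else
    let ml_level := PySem.Dict.getD (PySem.Dict.mk ml_risk) "final_risk" "unknown"
    let rule_level := PySem.Dict.getD (PySem.Dict.mk rule_risk) "risk_level" "unknown"
    let risk_mapping : PySem.Dict String Int :=
      PySem.Dict.mk [("safe", 0), ("low_risk", 1), ("high_risk", 2), ("dangerous", 3)]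
    let ml_score := PySem.Dict.getD risk_mapping ml_level 1
    let rule_score := PySem.Dict.getD risk_mapping rule_level 1
    let final_score := max ml_score rule_score
    -- the for-loop with early return = first item whose score equals final_score
    match risk_mapping.items.find? (fun p => p.2 == final_score) with
    | some p => p.1
    | none => "unknown"

-- ===== PORT B =====
def determine_final_risk_py_alt (ml_risk : List (String × String)) (rule_risk : List (String × String)) : String :=
  if ml_risk = [] ∨ rule_risk = [] then "unknown"
  else
    let ml_level := PySem.Dict.getD (PySem.Dict.mk ml_risk) "final_risk" "unknown"
    let rule_level := PySem.Dict.getD (PySem.Dict.mk rule_risk) "risk_level" "unknown"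
    -- 'x in pair' on the 2-tuple = equality with either component
    if ml_level = "dangerous" ∨ rule_level = "dangerous" then "dangerous"
    else if ml_level = "high_risk" ∨ rule_level = "high_risk" then "high_risk"
    else if ml_level = "safe" ∧ rule_level = "safe" then "safe"
    else "low_risk"

-- ===== PRECONDITION & SPEC =====
def Spec_determine_final_risk_py (ml_risk : List (String × String)) (rule_risk : List (String × String)) (out : String) : Prop := out = determine_final_risk_py_alt ml_risk rule_risk
instance (ml_risk : List (String × String)) (rule_risk : List (String × String)) (out : String) : Decidable (Spec_determine_final_risk_py ml_risk rule_risk out) := by unfold Spec_determine_final_risk_py; infer_instance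

-- ===== CLAIM =====
def Claim_equal_determine_final_risk_py : Prop := ∀ (ml_risk : List (String × String)) (rule_risk : List (String × String)), Dom_determine_final_risk_py ml_risk rule_risk → Spec_determine_final_risk_py ml_risk rule_risk (determine_final_risk_py ml_risk rule_risk)

-- ===== LEMMAS AND PROOFS =====

-- classify a string: one of the four level names, or all (dis)equalities against them are false
theorem level_cases (a : String) :
    a = "safe" ∨ a = "low_risk" ∨ a = "high_risk" ∨ a = "dangerous" ∨
    ((("safe" == a) = false) ∧ (("low_risk" == a) = false) ∧ (("high_risk" == a) = false) ∧
     (("dangerous" == a) = false) ∧ ((a == "safe") = false) ∧ ((a == "low_risk") = false) ∧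
     ((a == "high_risk") = false) ∧ ((a == "dangerous") = false) ∧
     (¬ a = "safe") ∧ (¬ a = "low_risk") ∧ (¬ a = "high_risk") ∧ (¬ a = "dangerous") ∧
     (¬ "safe" = a) ∧ (¬ "low_risk" = a) ∧ (¬ "high_risk" = a) ∧ (¬ "dangerous" = a)) := by
  by_cases h1 : a = "safe"; · exact Or.inl h1
  by_cases h2 : a = "low_risk"; · exact Or.inr (Or.inl h2)
  by_cases h3 : a = "high_risk"; · exact Or.inr (Or.inr (Or.inl h3))
  by_cases h4 : a = "dangerous"; · exact Or.inr (Or.inr (Or.inr (Or.inl h4)))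
  exact Or.inr (Or.inr (Or.inr (Or.inr
    ⟨beq_false_of_ne (Ne.symm h1), beq_false_of_ne (Ne.symm h2), beq_false_of_ne (Ne.symm h3),
     beq_false_of_ne (Ne.symm h4), beq_false_of_ne h1, beq_false_of_ne h2,
     beq_false_of_ne h3, beq_false_of_ne h4, h1, h2, h3, h4,
     Ne.symm h1, Ne.symm h2, Ne.symm h3, Ne.symm h4⟩)))

-- Both cores depend only on the two looked-up strings; prove them equal by exhausting
-- membership of each string in the four known level names.
theorem core_eq (a b : String) :
    (match (PySem.Dict.mk [("safe", (0:Int)), ("low_risk", 1), ("high_risk", 2), ("dangerous", 3)]).items.find?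
        (fun p => p.2 == max (PySem.Dict.getD (PySem.Dict.mk [("safe", (0:Int)), ("low_risk", 1), ("high_risk", 2), ("dangerous", 3)]) a 1)
                              (PySem.Dict.getD (PySem.Dict.mk [("safe", (0:Int)), ("low_risk", 1), ("high_risk", 2), ("dangerous", 3)]) b 1)) with
     | some p => p.1
     | none => "unknown") =
    (if a = "dangerous" ∨ b = "dangerous" then "dangerous"
     else if a = "high_risk" ∨ b = "high_risk" then "high_risk"
     else if a = "safe" ∧ b = "safe" then "safe"
     else "low_risk") := by
  rcases level_cases a with ha | ha | ha | ha | ha <;>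
  rcases level_cases b with hb | hb | hb | hb | hb <;>
  try subst_vars <;>
  (try obtain ⟨ha1, ha2, ha3, ha4, ha5, ha6, ha7, ha8, ha9, ha10, ha11, ha12, ha13, ha14, ha15, ha16⟩ := ha) <;>
  (try obtain ⟨hb1, hb2, hb3, hb4, hb5, hb6, hb7, hb8, hb9, hb10, hb11, hb12, hb13, hb14, hb15, hb16⟩ := hb) <;>
  simp [*, PySem.Dict.getD, PySem.Dict.get?, List.find?]

-- ===== VERDICT =====
theorem determine_final_risk_py_spec : Claim_equal_determine_final_risk_py := by
  intro ml_risk rule_risk _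
  unfold Spec_determine_final_risk_py determine_final_risk_py determine_final_risk_py_alt
  by_cases h : ml_risk = [] ∨ rule_risk = []
  · simp [h]
  · simp only [h, if_false]
    exact core_eq _ _
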